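-- pv_equiv track=rewrite | github.com/castle6116/CodeCrushers | 지은/n2배열자르기.py | solution
-- ===== SOURCE A (Python) =====
-- def solution(n, left, right):
--     arr = [[] for i in range(n)]
--     for col in range(n):
--         for row in range(n):
--             if row >= col:
--                 arr[row].append(row+1)
--             else:
--                 arr[row].append(col+1)
--
--     stack = []
--     for i in arr:
--         for k in i:
--             stack.append(k)
--     return stack[left:right+1]
-- ===== SOURCE B (Python) =====
-- def solution(n, left, right):
--     # Empty grid for non-positive n; otherwise compute each requested cell
--     # directly: cell at flat index i is max(i // n, i % n) + 1.
--     if n <= 0: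
--         return []
--     return [max(i // n, i % n) + 1 for i in range(n * n)[left:right + 1]]
-- ===== Notes on version B (the rewrite author's own statement) =====
-- stated objective: faster
-- what changed: Instead of materialising the whole n×n matrix and flattening it, B computes each requested element directly by the closed form max(i//n, i%n)+1 over just the sliced index range.
import Mathlib
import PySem

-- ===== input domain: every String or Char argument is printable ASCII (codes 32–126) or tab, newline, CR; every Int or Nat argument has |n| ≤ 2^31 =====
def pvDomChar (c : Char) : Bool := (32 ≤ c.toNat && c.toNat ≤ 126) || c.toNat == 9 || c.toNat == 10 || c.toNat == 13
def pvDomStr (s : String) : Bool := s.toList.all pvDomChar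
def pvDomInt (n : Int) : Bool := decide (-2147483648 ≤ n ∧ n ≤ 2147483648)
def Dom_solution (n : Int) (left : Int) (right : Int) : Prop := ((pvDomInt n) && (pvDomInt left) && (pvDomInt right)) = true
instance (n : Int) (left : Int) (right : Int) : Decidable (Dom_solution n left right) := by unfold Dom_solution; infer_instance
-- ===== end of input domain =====

-- B replaces A's O(n^2) build-matrix-then-flatten-then-slice by computing each
-- requested element of the slice directly with the closed form max(i//n, i%n)+1.

-- ===== PORT A =====
def solution (n : Int) (left : Int) (right : Int) : List Int :=
  let arr0 : List (List Int) := (PySem.List.pyRange 0 n 1).map (fun _ => ([] : List Int))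
  let arr : List (List Int) :=
    (PySem.List.pyRange 0 n 1).foldl (fun a col =>
      (PySem.List.pyRange 0 n 1).foldl (fun a row =>
        a.set row.toNat ((a.getD row.toNat []) ++ [if row ≥ col then row + 1 else col + 1])) a) arr0
  let stack : List Int := arr.foldl (fun s i => i.foldl (fun s k => s ++ [k]) s) []
  PySem.List.slice stack (some left) (some (right + 1))

-- ===== PORT B =====
def solution_alt (n : Int) (left : Int) (right : Int) : List Int :=
  if n ≤ 0 then []
  else
    (PySem.List.slice (PySem.List.pyRange 0 (n * n) 1) (some left) (some (right + 1))).map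
      (fun i => max (PySem.Int.floordiv i n) (PySem.Int.mod i n) + 1)

-- ===== PRECONDITION & SPEC =====
def Spec_solution (n : Int) (left : Int) (right : Int) (out : List Int) : Prop := out = solution_alt n left right
instance (n : Int) (left : Int) (right : Int) (out : List Int) : Decidable (Spec_solution n left right out) := by unfold Spec_solution; infer_instance

-- ===== CLAIM (what is proved, stated in full; the proofs are below) =====
def Claim_equal_solution : Prop := ∀ (n : Int) (left : Int) (right : Int), Dom_solution n left right → Spec_solution n left right (solution n left right)

-- ===== LEMMAS AND PROOFS =====

-- map commutes with slice (slice only inspects the length).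
theorem pv_slice_map {α β : Type} (f : α → β) (xs : List α) (a b : Int) :
    (PySem.List.slice xs (some a) (some b)).map f
      = PySem.List.slice (xs.map f) (some a) (some b) := by
  simp [PySem.List.slice]

-- fold appending each element = append the whole list
theorem pv_foldl_app (l : List Int) (s : List Int) :
    l.foldl (fun s k => s ++ [k]) s = s ++ l := by
  induction l generalizing s with
  | nil => simp
  | cons x xs ih => simp [ih]

-- the flattening double loop
theorem pv_foldl_flatten (L : List (List Int)) (s : List Int) :
    L.foldl (fun s i => i.foldl (fun s k => s ++ [k]) s) s = s ++ L.flatten := by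
  induction L generalizing s with
  | nil => simp
  | cons x xs ih =>
    simp only [List.foldl_cons]
    rw [pv_foldl_app, ih]
    simp

-- fold that sets each index j := f j (old value), over range N
theorem pv_foldl_set (f : Nat → List Int → List Int) :
    ∀ (N : Nat) (L : List (List Int)), N ≤ L.length →
      (List.range N).foldl (fun a j => a.set j (f j (a.getD j []))) L
        = (L.take N).mapIdx f ++ L.drop N := by
  intro N
  induction N with
  | zero => intro L _; simp
  | succ N ih =>
    intro L hN
    have hlt : N < L.length := by omega
    rw [List.range_succ, List.foldl_append, ih L (by omega)]
    have hdrop : L.drop N = L[N] :: L.drop (N + 1) := List.drop_eq_getElem_cons hlt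
    have hlen : ((L.take N).mapIdx f).length = N := by
      simp [List.length_take, Nat.min_eq_left (le_of_lt hlt)]
    have hgetD : ((L.take N).mapIdx f ++ L.drop N).getD N [] = L[N] := by
      rw [hdrop, List.getD_eq_getElem?_getD, List.getElem?_append_right (by omega)]
      simp [hlen, List.getElem?_eq_getElem hlt]
    have hset : ((L.take N).mapIdx f ++ L.drop N).set N (f N L[N])
        = (L.take N).mapIdx f ++ (f N L[N] :: L.drop (N + 1)) := by
      rw [hdrop, List.set_append_right _ _ (by omega)]
      simp only [hlen, Nat.sub_self]
      rfl
    have htake : L.take (N + 1) = L.take N ++ [L[N]] := by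
        rw [List.take_add_one]; simp [List.getElem?_eq_getElem hlt]
    simp only [List.foldl_cons, List.foldl_nil, hgetD, hset, htake, List.mapIdx_append]
    simp [Nat.min_eq_left (le_of_lt hlt)]

-- mapIdx over a map-of-range collapses to a map-of-range
theorem pv_mapIdx_map_range {β : Type} (N : Nat) (h : Nat → β) (f : Nat → β → β) :
    ((List.range N).map h).mapIdx f = (List.range N).map (fun r => f r (h r)) := by
  apply List.ext_getElem
  · simp
  · intro i h1 h2
    simp [List.getElem_mapIdx]

-- flatten of an M×n grid given row-wise = the map over the flat range
theorem pv_flatten_grid (h : Nat → Nat → Int) (n : Nat) (hn : 0 < n) :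
    ∀ M : Nat,
      ((List.range M).map (fun r => (List.range n).map (h r))).flatten
        = (List.range (M * n)).map (fun i => h (i / n) (i % n)) := by
  intro M
  induction M with
  | zero => simp
  | succ M ih =>
    have hsplit : (M + 1) * n = M * n + n := by ring
    rw [List.range_succ, List.map_append, List.flatten_append, ih, hsplit,
      List.range_add, List.map_append]
    simp only [List.map_cons, List.map_nil, List.flatten_cons, List.flatten_nil, List.append_nil]
    congr 1
    rw [List.map_map]
    apply List.map_congr_left
    intro c hc
    have hc' : c < n := List.mem_range.mp hc
    have h1 : (M * n + c) / n = M := by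
      rw [Nat.add_comm, Nat.add_mul_div_right _ _ hn, Nat.div_eq_of_lt hc']; omega
    have h2 : (M * n + c) % n = c := by
      rw [Nat.add_comm, Nat.add_mul_mod_self_right, Nat.mod_eq_of_lt hc']
    simp [h1, h2]

-- the matrix-building double loop produces the grid of cell values g row col
theorem pv_build_grid (g : Nat → Nat → Int) (N : Nat) :
    ∀ C : Nat,
      (List.range C).foldl (fun a c =>
          (List.range N).foldl (fun a j =>
            a.set j ((a.getD j []) ++ [g j c])) a)
        ((List.range N).map (fun _ => ([] : List Int)))
        = (List.range N).map (fun r => (List.range C).map (fun c => g r c)) := by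
  intro C
  induction C with
  | zero => simp
  | succ C ih =>
    rw [List.range_succ, List.foldl_append, ih]
    simp only [List.foldl_cons, List.foldl_nil]
    rw [pv_foldl_set (fun j xs => xs ++ [g j C]) N _ (by simp)]
    have hlen2 : ((List.range N).map (fun r => (List.range C).map (fun c => g r c))).length = N := by simp
    rw [List.take_of_length_le (le_of_eq hlen2), List.drop_eq_nil_of_le (le_of_eq hlen2), List.append_nil]
    rw [pv_mapIdx_map_range]
    apply List.map_congr_left
    intro r _
    simp

-- ===== VERDICT (by name: the statement is the Claim_ definition above) =====
theorem solution_spec : Claim_equal_solution := by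
  intro n left right _
  unfold Spec_solution solution solution_alt
  by_cases hn : n ≤ 0
  · rw [if_pos hn, PySem.List.pyRange_one_eq_nil (by omega)]
    simp [PySem.List.slice, PySem.List.clampIdx]
  · rw [if_neg hn]
    have hn0 : 0 < n := by omega
    set N := n.toNat with hN
    set g : Nat → Nat → Int := fun r c => if (r : Int) ≥ (c : Int) then (r : Int) + 1 else (c : Int) + 1 with hg
    have hnN : n = (N : Int) := by omega
    have hNpos : 0 < N := by omega
    have hrange : PySem.List.pyRange 0 n 1 = (List.range N).map (fun k => ((k : Nat) : Int)) := by
      rw [PySem.List.pyRange_one]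
      simp [hN]
    rw [hrange]
    simp only [List.foldl_map, Function.comp_def, Int.toNat_natCast, ge_iff_le, List.map_map]
    have hA := pv_build_grid g N N
    have hF := pv_flatten_grid g N hNpos N
    simp only [hg, ge_iff_le] at hA hF
    rw [hA, pv_foldl_flatten, List.nil_append, hF]
    have hB : PySem.List.pyRange 0 (n * n) 1 = (List.range (N * N)).map (fun k => ((k : Nat) : Int)) := by
      rw [PySem.List.pyRange_one]
      congr 1
      · funext k; simp
      · congr 1; rw [hnN]; omega
    rw [hB, ← pv_slice_map, ← pv_slice_map, List.map_map]
    apply List.map_congr_left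
    intro i hi
    have hiN : i < N * N := List.mem_range.mp (PySem.List.mem_of_mem_slice _ _ _ hi)
    simp only [Function.comp_apply, hnN, PySem.Int.floordiv_natCast, PySem.Int.mod_natCast]
    by_cases hge : ((i % N : Nat) : Int) ≤ ((i / N : Nat) : Int)
    · rw [if_pos hge, max_eq_left hge]
    · rw [if_neg hge, max_eq_right (le_of_not_ge hge)]
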